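-- pv_equiv track=rewrite | github.com/wedlaken/listener-maths-crossword | interactive_solver.py | generate_anagram_solutions_for_clue
-- ===== SOURCE A (Python) =====
-- from typing import Dict, List, Tuple, Optional, Set
--
-- def generate_anagram_solutions_for_clue(original_solution: int, length: int, is_unclued: bool) -> List[int]:
--     """Generate anagram solutions for a given clue."""
--     if not original_solution:
--         return []
--
--     solution_str = str(original_solution)
--     digits = list(solution_str)
--
--     if length == 2:
--         # For 2-digit numbers, just swap the digits
--         swapped = digits[1] + digits[0]
--         return [int(swapped)] if swapped != solution_str else []
--
--     # Generate all permutations and eliminate duplicates using a set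
--     from itertools import permutations
--     anagram_set = set()
--
--     for perm in permutations(digits):
--         anagram_str = ''.join(perm)
--         if anagram_str != solution_str and anagram_str[0] != '0':
--             anagram_num = int(anagram_str)
--
--             if is_unclued:
--                 # For unclued clues, anagrams must be multiples of the original
--                 if anagram_num % original_solution == 0:
--                     anagram_set.add(anagram_num)
--             else:
--                 # For clued clues, any anagram is valid
--                 anagram_set.add(anagram_num)
--
--     return sorted(list(anagram_set))
-- ===== SOURCE B (Python) =====
-- def generate_anagram_solutions_for_clue(original_solution: int, length: int, is_unclued: bool):
--     if not original_solution:
--         return []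
--     s = str(original_solution)
--     if length == 2:
--         t = s[1] + s[0]
--         return [int(t)] if t != s else []
--     d = len(s)
--     if is_unclued:
--         # Every valid anagram is a multiple k*original with k >= 2 and k*original < 10**d:
--         # scan ascending multiples, keeping the digit-anagrams (already sorted, already distinct).
--         target = sorted(s)
--         limit = 10 ** d
--         out = []
--         for k in range(2, (limit - 1) // original_solution + 1):
--             num = k * original_solution
--             if sorted(str(num)) == target:
--                 out.append(num)
--         return out
--     # Clued: multiset-permutation DFS over digit counts; emits the distinct anagrams
--     # (no leading zero, original excluded) directly in increasing order.
--     cnt = [s.count(str(dig)) for dig in range(10)]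
--     out = []
--     def dfs(pref, rem):
--         if rem == 0:
--             if pref != original_solution:
--                 out.append(pref)
--             return
--         for dig in range(10):
--             if cnt[dig] > 0 and not (rem == d and dig == 0):
--                 cnt[dig] -= 1
--                 dfs(pref * 10 + dig, rem - 1)
--                 cnt[dig] += 1
--     dfs(0, d)
--     return out
-- ===== Notes on version B (the rewrite author's own statement) =====
-- stated objective: alternative
-- what changed: A enumerates all len(s)! digit permutations, deduplicates through a set and sorts; B never permutes: for unclued clues it scans the ascending multiples k*original (2 <= k, k*original < 10**d) keeping digit-anagrams, and for clued clues it runs a multiset-permutation DFS over per-digit counts that emits each distinct anagram exactly once, already in increasing order (no set, no sort).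
import Mathlib
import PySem

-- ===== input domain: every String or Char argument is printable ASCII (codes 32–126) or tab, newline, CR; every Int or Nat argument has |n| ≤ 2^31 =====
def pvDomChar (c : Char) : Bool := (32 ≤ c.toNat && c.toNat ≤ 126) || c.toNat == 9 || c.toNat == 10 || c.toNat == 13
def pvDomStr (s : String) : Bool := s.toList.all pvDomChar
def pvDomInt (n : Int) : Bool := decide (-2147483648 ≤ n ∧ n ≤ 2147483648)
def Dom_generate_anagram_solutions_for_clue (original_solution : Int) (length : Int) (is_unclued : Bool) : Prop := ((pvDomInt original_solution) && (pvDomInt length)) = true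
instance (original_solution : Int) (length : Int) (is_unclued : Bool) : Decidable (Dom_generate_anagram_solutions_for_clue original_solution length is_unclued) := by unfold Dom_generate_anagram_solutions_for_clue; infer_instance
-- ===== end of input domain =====

-- B replaces A's permutation-set-sort by an ascending multiples scan (unclued) and a
-- digit-count DFS emitting distinct anagrams in increasing order (clued): same values, no set, no sort.

-- ===== PORT A =====
-- int(str) applied to a pure ASCII-digit string (every string it is applied to here is a
-- permutation of str(original_solution), original_solution ≥ 0 under Pre_): exact decimal valuation.
def pvDigit (c : Char) : Int := (c.toNat : Int) - 48
def pvIntOfDigits (cs : List Char) : Int := cs.foldl (fun a c => a * 10 + pvDigit c) 0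

def generate_anagram_solutions_for_clue (original_solution : Int) (length : Int) (is_unclued : Bool) : List Int :=
  if original_solution = 0 then []
  else
    let solution_str := PySem.Int.toChars original_solution
    if length = 2 then
      -- swapped = digits[1] + digits[0] (indices in range under Pre_)
      let swapped := [PySem.List.pyGetD solution_str 1 ' ', PySem.List.pyGetD solution_str 0 ' ']
      if swapped ≠ solution_str then [pvIntOfDigits swapped] else []
    else
      let anagram_set := (PySem.List.permutations solution_str solution_str.length).foldl
        (fun st perm =>
          if perm ≠ solution_str ∧ PySem.List.pyGetD perm 0 ' ' ≠ '0' then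
            if is_unclued then
              if PySem.Int.mod (pvIntOfDigits perm) original_solution = 0 then
                PySem.Set.add st (pvIntOfDigits perm)
              else st
            else PySem.Set.add st (pvIntOfDigits perm)
          else st)
        (PySem.Set.empty : PySem.Set Int)
      PySem.List.sorted anagram_set (fun x => x)

-- ===== PORT B =====
def pvDfs (orig : Int) (d : Nat) (cnt : Nat → Nat) (pref : Int) : Nat → List Int
  | 0 => if pref ≠ orig then [pref] else []
  | r + 1 =>
    (List.range 10).foldl
      (fun out dig =>
        if 0 < cnt dig ∧ ¬(r + 1 = d ∧ dig = 0) then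
          out ++ pvDfs orig d (fun j => if j = dig then cnt dig - 1 else cnt j) (pref * 10 + (dig : Int)) r
        else out) []

def generate_anagram_solutions_for_clue_alt (original_solution : Int) (length : Int) (is_unclued : Bool) : List Int :=
  if original_solution = 0 then []
  else
    let s := PySem.Int.toChars original_solution
    if length = 2 then
      let t := [PySem.List.pyGetD s 1 ' ', PySem.List.pyGetD s 0 ' ']
      if t ≠ s then [pvIntOfDigits t] else []
    else
      let d := s.length
      if is_unclued then
        let target := PySem.List.sorted s (fun c => c)
        let limit : Int := 10 ^ d
        (PySem.List.pyRange 2 (PySem.Int.floordiv (limit - 1) original_solution + 1) 1).foldl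
          (fun out k =>
            if PySem.List.sorted (PySem.Int.toChars (k * original_solution)) (fun c => c) = target
            then out ++ [k * original_solution] else out) []
      else
        pvDfs original_solution d (fun dig => s.count (Char.ofNat (48 + dig))) 0 d

-- ===== PRECONDITION & SPEC =====
-- Pre_ excludes exactly the inputs where the Python A raises: a negative original_solution
-- (int() gets a permuted string with '-' inside: ValueError) and length == 2 with a one-digit
-- original_solution (digits[1]: IndexError).
def Pre_generate_anagram_solutions_for_clue (original_solution : Int) (length : Int) (is_unclued : Bool) : Prop :=
  0 ≤ original_solution ∧ (length = 2 → (original_solution = 0 ∨ 10 ≤ original_solution))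
instance (original_solution : Int) (length : Int) (is_unclued : Bool) : Decidable (Pre_generate_anagram_solutions_for_clue original_solution length is_unclued) := by unfold Pre_generate_anagram_solutions_for_clue; infer_instance
def pvWitness_generate_anagram_solutions_for_clue : Int × Int × Bool := (84, 3, true)

def Spec_generate_anagram_solutions_for_clue (original_solution : Int) (length : Int) (is_unclued : Bool) (out : List Int) : Prop := out = generate_anagram_solutions_for_clue_alt original_solution length is_unclued
instance (original_solution : Int) (length : Int) (is_unclued : Bool) (out : List Int) : Decidable (Spec_generate_anagram_solutions_for_clue original_solution length is_unclued out) := by unfold Spec_generate_anagram_solutions_for_clue; infer_instance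

-- ===== CLAIM (what is proved, stated in full; the proofs are below) =====
def Claim_equal_generate_anagram_solutions_for_clue : Prop := ∀ (original_solution : Int) (length : Int) (is_unclued : Bool), Dom_generate_anagram_solutions_for_clue original_solution length is_unclued → Pre_generate_anagram_solutions_for_clue original_solution length is_unclued → Spec_generate_anagram_solutions_for_clue original_solution length is_unclued (generate_anagram_solutions_for_clue original_solution length is_unclued)

-- ===== LEMMAS AND PROOFS =====


theorem pv_isDigit_iff (c : Char) : c.isDigit = true ↔ 48 ≤ c.toNat ∧ c.toNat ≤ 57 := by
  simp [Char.isDigit, UInt32.le_iff_toNat_le]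

theorem pv_mem_toDigits_isDigit {n : Nat} {c : Char} (h : c ∈ Nat.toDigits 10 n) : c.isDigit = true :=
  Nat.isDigit_of_mem_toDigits (by norm_num) (by norm_num) h

theorem pv_digitChar_eq (c : Char) (h : c.isDigit = true) : Nat.digitChar (c.toNat - 48) = c := by
  obtain ⟨h1, h2⟩ := (pv_isDigit_iff c).mp h
  have : c.toNat < 58 := by omega
  symm
  interval_cases h3 : c.toNat <;>
    (apply Char.ext; apply UInt32.toNat_inj.mp; rw [show c.val.toNat = c.toNat from rfl, h3]; rfl)

theorem pv_pvDigit_digitChar (k : Nat) (h : k < 10) : pvDigit (Nat.digitChar k) = (k : Int) := by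
  interval_cases k <;> rfl

theorem pv_isDigit_digitChar (k : Nat) (h : k < 10) : (Nat.digitChar k).isDigit = true := by
  interval_cases k <;> rfl

theorem pv_val_append (xs : List Char) (c : Char) :
    pvIntOfDigits (xs ++ [c]) = pvIntOfDigits xs * 10 + pvDigit c := by
  simp [pvIntOfDigits, List.foldl_append]

theorem pv_val_bounds (p : List Char) (h : ∀ c ∈ p, c.isDigit = true) :
    0 ≤ pvIntOfDigits p ∧ pvIntOfDigits p < 10 ^ p.length := by
  induction p using List.reverseRecOn with
  | nil => simp [pvIntOfDigits]
  | append_singleton xs c ih =>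
    have hc := (pv_isDigit_iff c).mp (h c (by simp))
    have ihx := ih (fun d hd => h d (by simp [hd]))
    rw [pv_val_append]
    constructor
    · have : (0:Int) ≤ pvDigit c := by unfold pvDigit; omega
      nlinarith [ihx.1]
    · have h10 : pvDigit c < 10 := by unfold pvDigit; omega
      have : pvIntOfDigits xs * 10 ≤ (10 ^ xs.length - 1) * 10 := by nlinarith [ihx.2]
      simp only [List.length_append, List.length_singleton]
      have : (10:Int) ^ (xs.length + 1) = 10 ^ xs.length * 10 := by ring
      nlinarith [ihx.2]

theorem pv_val_toDigits (n : Nat) : pvIntOfDigits (Nat.toDigits 10 n) = (n : Int) := by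
  induction n using Nat.strong_induction_on with
  | _ n ih =>
    rw [Nat.toDigits_eq_if (by norm_num)]
    by_cases h : n < 10
    · simp only [if_pos h]
      show pvIntOfDigits ([] ++ [n.digitChar]) = n
      rw [pv_val_append, pv_pvDigit_digitChar n h]; simp [pvIntOfDigits]
    · simp only [if_neg h]
      rw [pv_val_append, ih (n / 10) (by omega), pv_pvDigit_digitChar _ (by omega)]
      push_cast
      omega

theorem pv_toDigits_head (n : Nat) (h : 1 ≤ n) : (Nat.toDigits 10 n).getD 0 ' ' ≠ '0' := by
  induction n using Nat.strong_induction_on with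
  | _ n ih =>
    rw [Nat.toDigits_eq_if (by norm_num)]
    by_cases hlt : n < 10
    · simp only [if_pos hlt]
      interval_cases n <;> decide
    · simp only [if_neg hlt]
      have hpos := @Nat.length_toDigits_pos 10 (n / 10)
      cases hd : Nat.toDigits 10 (n / 10) with
      | nil => rw [hd] at hpos; simp at hpos
      | cons a t =>
        have := ih (n / 10) (by omega) (by omega)
        rw [hd] at this
        simpa using this

theorem pv_toDigits_canonical (p : List Char) (hd : ∀ c ∈ p, c.isDigit = true) (hne : p ≠ [])
    (hhead : p.getD 0 ' ' ≠ '0') : Nat.toDigits 10 (pvIntOfDigits p).toNat = p := by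
  induction p using List.reverseRecOn with
  | nil => exact absurd rfl hne
  | append_singleton xs c ih =>
    have hc := (pv_isDigit_iff c).mp (hd c (by simp))
    rw [pv_val_append]
    cases xs with
    | nil =>
      simp only [pvIntOfDigits, List.foldl_nil, zero_mul, zero_add]
      have h1 : (pvDigit c).toNat = c.toNat - 48 := by unfold pvDigit; omega
      rw [h1, Nat.toDigits_of_lt_base (by omega), pv_digitChar_eq c (hd c (by simp))]; simp
    | cons a t =>
      set q : List Char := a :: t with hq
      have hqd : ∀ d ∈ q, d.isDigit = true := fun d hdm => hd d (by simp [hq] at hdm ⊢; tauto)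
      have hqh : q.getD 0 ' ' ≠ '0' := by simpa [hq] using hhead
      have ihq := ih hqd (by simp [hq]) hqh
      have hvb := pv_val_bounds q hqd
      have hv1 : 1 ≤ (pvIntOfDigits q).toNat := by
        rcases Nat.eq_zero_or_pos (pvIntOfDigits q).toNat with h0 | h1
        · exfalso
          rw [h0] at ihq
          have : Nat.toDigits 10 0 = ['0'] := rfl
          rw [this] at ihq
          rw [← ihq] at hqh
          simp at hqh
        · exact h1
      have harith : (pvIntOfDigits q * 10 + pvDigit c).toNat
          = 10 * (pvIntOfDigits q).toNat + (c.toNat - 48) := by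
        unfold pvDigit; omega
      rw [harith, ← Nat.toDigits_append_toDigits (by norm_num) hv1 (by omega), ihq,
        Nat.toDigits_of_lt_base (by omega), pv_digitChar_eq c (hd c (by simp))]

theorem pv_toChars_nonneg (n : Int) (h : 0 ≤ n) :
    PySem.Int.toChars n = Nat.toDigits 10 n.toNat := by
  unfold PySem.Int.toChars
  rw [if_neg (by omega)]

-- Block 2: every permutation of xs occurs in PySem.List.permutations xs xs.length
theorem pv_mem_permutations_of_perm {α : Type} (p xs : List α) (h : p.Perm xs) :
    p ∈ PySem.List.permutations xs xs.length := by
  induction p generalizing xs with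
  | nil =>
    have : xs = [] := (List.Perm.nil_eq h).symm
    subst this
    simp [PySem.List.permutations]
  | cons a p' ih =>
    have ha : a ∈ xs := h.mem_iff.mp (by simp)
    obtain ⟨i, hi, hgi⟩ := List.mem_iff_getElem.mp ha
    have hgi? : xs[i]? = some a := by simp [List.getElem?_eq_getElem hi, hgi]
    have hperm := PySem.List.perm_cons_eraseIdx xs hgi?
    have hp' : p'.Perm (xs.eraseIdx i) := (List.perm_cons a).mp (h.trans hperm.symm)
    have hlen : (xs.eraseIdx i).length = p'.length := by
      rw [List.length_eraseIdx_of_lt hi]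
      have := h.length_eq
      simp at this
      omega
    have hxslen : xs.length = p'.length + 1 := by
      have := h.length_eq; simp at this; omega
    rw [hxslen, PySem.List.permutations_succ]
    refine List.mem_flatMap.mpr ⟨i, by simp [← hxslen, hi], ?_⟩
    rw [hgi?]
    refine List.mem_map.mpr ⟨p', ?_, rfl⟩
    rw [← hlen]
    exact ih _ hp'

-- Block 3: membership / nodup of a conditional set-accumulating fold
theorem pv_mem_foldl_setadd {α β : Type} [BEq α] [LawfulBEq α] (C : β → Prop) [DecidablePred C]
    (f : β → α) (l : List β) (st : PySem.Set α) (n : α) :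
    n ∈ l.foldl (fun st p => if C p then PySem.Set.add st (f p) else st) st
      ↔ n ∈ st ∨ ∃ p ∈ l, C p ∧ n = f p := by
  induction l generalizing st with
  | nil => simp
  | cons x t ih =>
    simp only [List.foldl_cons]
    by_cases hx : C x
    · rw [if_pos hx, ih]
      simp only [PySem.Set.mem_add, List.mem_cons]
      aesop
    · rw [if_neg hx, ih]
      simp only [List.mem_cons]
      aesop

theorem pv_nodup_foldl_setadd {α β : Type} [BEq α] [LawfulBEq α] (C : β → Prop) [DecidablePred C]
    (f : β → α) (l : List β) (st : PySem.Set α) (h : st.Nodup) :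
    (l.foldl (fun st p => if C p then PySem.Set.add st (f p) else st) st).Nodup := by
  induction l generalizing st with
  | nil => exact h
  | cons x t ih =>
    simp only [List.foldl_cons]
    by_cases hx : C x
    · rw [if_pos hx]; exact ih _ (PySem.Set.nodup_add st (f x) h)
    · rw [if_neg hx]; exact ih _ h

-- Block 4: pyRange is strictly increasing
theorem pv_pyRange_pairwise (a b : Int) : List.Pairwise (· < ·) (PySem.List.pyRange a b) := by
  by_cases hab : a < b
  · have hk : ∃ k : Nat, (b - a).toNat = k := ⟨_, rfl⟩
    obtain ⟨k, hk⟩ := hk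
    induction k generalizing a with
    | zero => omega
    | succ k ih =>
      rw [PySem.List.pyRange_one_cons hab]
      refine List.Pairwise.cons ?_ ?_
      · intro x hx
        have := PySem.List.mem_pyRange_one.mp hx
        omega
      · by_cases h2 : a + 1 < b
        · exact ih (a+1) h2 (by omega)
        · have : PySem.List.pyRange (a+1) b = [] := by
            rw [List.eq_nil_iff_forall_not_mem]
            intro x hx
            have := PySem.List.mem_pyRange_one.mp hx
            omega
          rw [this]
          exact List.Pairwise.nil
  · have : PySem.List.pyRange a b = [] := by
      rw [List.eq_nil_iff_forall_not_mem]
      intro x hx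
      have := PySem.List.mem_pyRange_one.mp hx
      omega
    rw [this]
    exact List.Pairwise.nil

-- Block 5: digit / char bridges
theorem pv_digitChar_inj : ∀ x, x < 10 → ∀ i, i < 10 → (Nat.digitChar x = Nat.digitChar i ↔ x = i) := by decide

theorem pv_char48 : ∀ i, i < 10 → Char.ofNat (48 + i) = Nat.digitChar i := by decide

theorem pv_count_map_digitChar (ds : List Nat) (hds : ∀ x ∈ ds, x < 10) (i : Nat) (hi : i < 10) :
    (ds.map Nat.digitChar).count (Nat.digitChar i) = ds.count i := by
  induction ds with
  | nil => simp
  | cons x t ih =>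
    have hx := hds x (by simp)
    have iht := ih (fun y hy => hds y (by simp [hy]))
    simp only [List.map_cons, List.count_cons, iht, beq_iff_eq]
    by_cases hxi : i = x
    · simp [hxi]
    · have h1 : ¬ (Nat.digitChar i = Nat.digitChar x) :=
        fun hc => hxi ((pv_digitChar_inj i hi x hx).mp hc)
      rw [if_neg (fun hh => h1 hh.symm), if_neg (fun hh => hxi hh.symm)]

theorem pv_val_map_digitChar (ds : List Nat) (hds : ∀ x ∈ ds, x < 10) :
    pvIntOfDigits (ds.map Nat.digitChar) = ds.foldl (fun (a : Int) (x : Nat) => a * 10 + (x : Int)) 0 := by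
  unfold pvIntOfDigits
  rw [List.foldl_map]
  apply PySem.List.foldl_congr_mem
  intro a x hx
  rw [pv_pvDigit_digitChar x (hds x hx)]

-- Block 6: digit-count sums
theorem pv_sum_count_nat (ds : List Nat) (h : ∀ x ∈ ds, x < 10) :
    ∑ i ∈ Finset.range 10, ds.count i = ds.length := by
  induction ds with
  | nil => simp
  | cons x t ih =>
    have hx := h x (by simp)
    have iht := ih (fun y hy => h y (by simp [hy]))
    simp only [List.count_cons, List.length_cons, Finset.sum_add_distrib, iht, beq_iff_eq]
    rw [Finset.sum_ite_eq (Finset.range 10) x (fun _ => 1)]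
    simp [Finset.mem_range.mpr hx]

theorem pv_sum_count_chars (s : List Char) (h : ∀ c ∈ s, c.isDigit = true) :
    ∑ i ∈ Finset.range 10, s.count (Nat.digitChar i) = s.length := by
  induction s with
  | nil => simp
  | cons c t ih =>
    have hc := (pv_isDigit_iff c).mp (h c (by simp))
    have iht := ih (fun y hy => h y (by simp [hy]))
    simp only [List.count_cons, List.length_cons, Finset.sum_add_distrib, iht, beq_iff_eq]
    have hcd : Nat.digitChar (c.toNat - 48) = c := pv_digitChar_eq c (h c (by simp))
    have hj : c.toNat - 48 < 10 := by omega
    have key : ∀ i ∈ Finset.range 10, ((if c = Nat.digitChar i then 1 else 0) : Nat) = if i = c.toNat - 48 then 1 else 0 := by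
      intro i hi
      by_cases hic : i = c.toNat - 48
      · simp [hic, hcd]
      · have h1 : ¬ (c = Nat.digitChar i) := by
          rw [← hcd]
          exact fun hcc => hic ((pv_digitChar_inj i (Finset.mem_range.mp hi) (c.toNat - 48) hj).mp hcc.symm)
        simp [hic, h1]
    rw [Finset.sum_congr rfl key, Finset.sum_ite_eq' (Finset.range 10) (c.toNat - 48) (fun _ => 1)]
    simp [Finset.mem_range.mpr hj]

theorem pv_counts_eq_of_le_of_sum (f g : Nat → Nat) (hle : ∀ i, i < 10 → f i ≤ g i)
    (hsum : ∑ i ∈ Finset.range 10, f i = ∑ i ∈ Finset.range 10, g i) :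
    ∀ i, i < 10 → f i = g i := by
  intro i hi
  by_contra hne
  have hlt : f i < g i := lt_of_le_of_ne (hle i hi) hne
  have : ∑ j ∈ Finset.range 10, f j < ∑ j ∈ Finset.range 10, g j :=
    Finset.sum_lt_sum (fun j hj => hle j (Finset.mem_range.mp hj)) ⟨i, Finset.mem_range.mpr hi, hlt⟩
  omega

-- Block 7: from a permuted digit string to its number and back
theorem pv_s_digits (orig : Int) (h1 : 1 ≤ orig) :
    ∀ c ∈ PySem.Int.toChars orig, c.isDigit = true := by
  rw [pv_toChars_nonneg orig (by omega)]
  exact fun c hc => pv_mem_toDigits_isDigit hc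

theorem pv_s_ne_nil (orig : Int) (h1 : 1 ≤ orig) : PySem.Int.toChars orig ≠ [] := by
  rw [pv_toChars_nonneg orig (by omega)]
  have := @Nat.length_toDigits_pos 10 orig.toNat
  intro h
  rw [h] at this
  simp at this

theorem pv_s_head (orig : Int) (h1 : 1 ≤ orig) :
    (PySem.Int.toChars orig).getD 0 ' ' ≠ '0' := by
  rw [pv_toChars_nonneg orig (by omega)]
  exact pv_toDigits_head orig.toNat (by omega)

theorem pv_s_val (orig : Int) (h1 : 1 ≤ orig) :
    pvIntOfDigits (PySem.Int.toChars orig) = orig := by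
  rw [pv_toChars_nonneg orig (by omega), pv_val_toDigits]
  omega

theorem pv_A_elem_good (orig : Int) (h1 : 1 ≤ orig) (p : List Char)
    (hp : p.Perm (PySem.Int.toChars orig)) (hne : p ≠ PySem.Int.toChars orig)
    (hh : p.getD 0 ' ' ≠ '0') :
    PySem.Int.toChars (pvIntOfDigits p) = p ∧ pvIntOfDigits p ≠ orig := by
  have pdig : ∀ c ∈ p, c.isDigit = true := fun c hc => pv_s_digits orig h1 c (hp.mem_iff.mp hc)
  have pne : p ≠ [] := by
    intro h
    rw [h] at hp
    exact pv_s_ne_nil orig h1 (List.Perm.nil_eq hp).symm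
  have hb := pv_val_bounds p pdig
  have hcan : Nat.toDigits 10 (pvIntOfDigits p).toNat = p := pv_toDigits_canonical p pdig pne hh
  have htc : PySem.Int.toChars (pvIntOfDigits p) = p := by
    rw [pv_toChars_nonneg _ hb.1]; exact hcan
  refine ⟨htc, fun hv => hne ?_⟩
  rw [← htc, hv]

theorem pv_good_elem_A (orig n : Int) (h1 : 1 ≤ orig)
    (hp : (PySem.Int.toChars n).Perm (PySem.Int.toChars orig)) (hne : n ≠ orig) :
    1 ≤ n ∧ PySem.Int.toChars n ≠ PySem.Int.toChars orig
      ∧ (PySem.Int.toChars n).getD 0 ' ' ≠ '0' ∧ pvIntOfDigits (PySem.Int.toChars n) = n := by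
  have hn0 : 0 ≤ n := by
    by_contra hneg
    have : '-' ∈ PySem.Int.toChars n := by
      unfold PySem.Int.toChars
      rw [if_pos (by omega)]
      simp
    have hds := pv_s_digits orig h1 '-' (hp.mem_iff.mp this)
    simp [pv_isDigit_iff] at hds
  have hn1 : 1 ≤ n := by
    rcases eq_or_lt_of_le hn0 with h0 | h0
    · exfalso
      have hz : PySem.Int.toChars n = ['0'] := by rw [← h0]; rfl
      rw [hz] at hp
      have : PySem.Int.toChars orig = ['0'] := (List.perm_singleton.mp hp.symm)
      have := pv_s_head orig h1
      rw [‹PySem.Int.toChars orig = ['0']›] at this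
      simp at this
    · omega
  refine ⟨hn1, fun hc => hne ?_, ?_, ?_⟩
  · rw [← pv_s_val orig h1, ← hc, pv_s_val n hn1]
  · exact pv_s_head n hn1
  · exact pv_s_val n hn1

-- A's fold: membership characterisation
theorem pv_A_mem (orig : Int) (h1 : 1 ≤ orig) (u : Bool) (n : Int) :
    (n ∈ (PySem.List.permutations (PySem.Int.toChars orig) (PySem.Int.toChars orig).length).foldl
        (fun st p =>
          if p ≠ PySem.Int.toChars orig ∧ PySem.List.pyGetD p 0 ' ' ≠ '0' then
            if u then
              if PySem.Int.mod (pvIntOfDigits p) orig = 0 then PySem.Set.add st (pvIntOfDigits p) else st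
            else PySem.Set.add st (pvIntOfDigits p)
          else st)
        (PySem.Set.empty : PySem.Set Int))
      ↔ ((PySem.Int.toChars n).Perm (PySem.Int.toChars orig) ∧ n ≠ orig
          ∧ (u = true → PySem.Int.mod n orig = 0)) := by
  have hbody : (fun (st : PySem.Set Int) p =>
          if p ≠ PySem.Int.toChars orig ∧ PySem.List.pyGetD p 0 ' ' ≠ '0' then
            if u then
              if PySem.Int.mod (pvIntOfDigits p) orig = 0 then PySem.Set.add st (pvIntOfDigits p) else st
            else PySem.Set.add st (pvIntOfDigits p)
          else st)
      = (fun st p =>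
          if (p ≠ PySem.Int.toChars orig ∧ p.getD 0 ' ' ≠ '0'
              ∧ (u = true → PySem.Int.mod (pvIntOfDigits p) orig = 0)) then
            PySem.Set.add st (pvIntOfDigits p)
          else st) := by
    funext st p
    rw [PySem.List.pyGetD_zero]
    cases u <;> split_ifs <;> tauto
  rw [hbody, pv_mem_foldl_setadd]
  simp only [PySem.Set.empty, List.not_mem_nil, false_or]
  constructor
  · rintro ⟨p, hpmem, ⟨hne, hh, hmod⟩, rfl⟩
    have hp := PySem.List.perm_of_mem_permutations hpmem
    obtain ⟨htc, hneq⟩ := pv_A_elem_good orig h1 p hp hne hh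
    refine ⟨by rw [htc]; exact hp, hneq, hmod⟩
  · rintro ⟨hp, hne, hmod⟩
    obtain ⟨hn1, hnec, hh, hval⟩ := pv_good_elem_A orig n h1 hp hne
    refine ⟨PySem.Int.toChars n, pv_mem_permutations_of_perm _ _ hp, ⟨hnec, hh, ?_⟩, hval.symm⟩
    intro hu
    rw [hval]
    exact hmod hu

theorem pv_A_nodup (orig : Int) (u : Bool) :
    ((PySem.List.permutations (PySem.Int.toChars orig) (PySem.Int.toChars orig).length).foldl
        (fun st p =>
          if p ≠ PySem.Int.toChars orig ∧ PySem.List.pyGetD p 0 ' ' ≠ '0' then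
            if u then
              if PySem.Int.mod (pvIntOfDigits p) orig = 0 then PySem.Set.add st (pvIntOfDigits p) else st
            else PySem.Set.add st (pvIntOfDigits p)
          else st)
        (PySem.Set.empty : PySem.Set Int)).Nodup := by
  have hbody : (fun (st : PySem.Set Int) p =>
          if p ≠ PySem.Int.toChars orig ∧ PySem.List.pyGetD p 0 ' ' ≠ '0' then
            if u then
              if PySem.Int.mod (pvIntOfDigits p) orig = 0 then PySem.Set.add st (pvIntOfDigits p) else st
            else PySem.Set.add st (pvIntOfDigits p)
          else st)
      = (fun st p =>
          if (p ≠ PySem.Int.toChars orig ∧ p.getD 0 ' ' ≠ '0'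
              ∧ (u = true → PySem.Int.mod (pvIntOfDigits p) orig = 0)) then
            PySem.Set.add st (pvIntOfDigits p)
          else st) := by
    funext st p
    rw [PySem.List.pyGetD_zero]
    cases u <;> split_ifs <;> tauto
  rw [hbody]
  exact pv_nodup_foldl_setadd _ _ _ _ List.nodup_nil

-- Block 8: the unclued multiples scan
theorem pv_scan_eq_map_filter (orig : Int) (target : List Char) (K : Int) :
    (PySem.List.pyRange 2 K).foldl
        (fun out k =>
          if PySem.List.sorted (PySem.Int.toChars (k * orig)) (fun c => c) = target
          then out ++ [k * orig] else out) []
      = ((PySem.List.pyRange 2 K).filter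
          (fun k => PySem.List.sorted (PySem.Int.toChars (k * orig)) (fun c => c) = target)).map
          (fun k => k * orig) := by
  have hbody : (fun (out : List Int) k =>
          if PySem.List.sorted (PySem.Int.toChars (k * orig)) (fun c => c) = target
          then out ++ [k * orig] else out)
      = (fun out k =>
          if (fun k => decide (PySem.List.sorted (PySem.Int.toChars (k * orig)) (fun c => c) = target)) k = true
          then out ++ [(fun k : Int => k * orig) k] else out) := by
    funext out k
    simp
  rw [hbody, PySem.List.foldl_append_if]
  simp [List.filter_congr]

theorem pv_scan_mem (orig : Int) (h1 : 1 ≤ orig) (n : Int) :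
    (n ∈ ((PySem.List.pyRange 2 (PySem.Int.floordiv (10 ^ (PySem.Int.toChars orig).length - 1) orig + 1)).filter
          (fun k => PySem.List.sorted (PySem.Int.toChars (k * orig)) (fun c => c)
            = PySem.List.sorted (PySem.Int.toChars orig) (fun c => c))).map (fun k => k * orig))
      ↔ ((PySem.Int.toChars n).Perm (PySem.Int.toChars orig) ∧ n ≠ orig
          ∧ (true = true → PySem.Int.mod n orig = 0)) := by
  constructor
  · rintro h
    obtain ⟨k, hk, rfl⟩ := List.mem_map.mp h
    obtain ⟨hkr, hsort⟩ := List.mem_filter.mp hk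
    have hk2 := (PySem.List.mem_pyRange_one.mp hkr).1
    have hperm : (PySem.Int.toChars (k * orig)).Perm (PySem.Int.toChars orig) :=
      (PySem.List.sorted_id_eq_sorted_id_iff_perm _ _).mp (by simpa using hsort)
    refine ⟨hperm, ?_, fun _ => ?_⟩
    · have : orig < k * orig := by nlinarith
      omega
    · rw [PySem.Int.mod_eq_zero_iff_dvd]
      exact ⟨k, by ring⟩
  · rintro ⟨hp, hne, hmod⟩
    have hdvd : orig ∣ n := (PySem.Int.mod_eq_zero_iff_dvd n orig).mp (hmod rfl)
    obtain ⟨k, hkn⟩ := hdvd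
    have hkn' : k * orig = n := by rw [hkn]; ring
    obtain ⟨hn1, _, _, _⟩ := pv_good_elem_A orig n h1 hp hne
    have hk1 : 1 ≤ k := by nlinarith
    have hk2 : 2 ≤ k := by
      rcases eq_or_lt_of_le hk1 with h | h
      · exfalso; apply hne; rw [hkn, ← h]; ring
      · omega
    have hlen : (PySem.Int.toChars n).length = (PySem.Int.toChars orig).length := hp.length_eq
    have hnlt : n < 10 ^ (PySem.Int.toChars orig).length := by
      have hd1 : 0 < (PySem.Int.toChars orig).length := by
        rw [pv_toChars_nonneg orig (by omega)]
        exact Nat.length_toDigits_pos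
      have := (Nat.length_toDigits_le_iff (b := 10) (n := n.toNat)
        (k := (PySem.Int.toChars orig).length) (by norm_num) hd1).mp
        (by rw [← pv_toChars_nonneg n (by omega)]; omega)
      have hcast : (n.toNat : Int) < ((10:Nat) ^ (PySem.Int.toChars orig).length : Nat) := by
        exact_mod_cast this
      push_cast at hcast
      omega
    refine List.mem_map.mpr ⟨k, List.mem_filter.mpr ⟨PySem.List.mem_pyRange_one.mpr ⟨hk2, ?_⟩, ?_⟩, by omega⟩
    · have hle : k ≤ PySem.Int.floordiv (10 ^ (PySem.Int.toChars orig).length - 1) orig := by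
        rw [PySem.Int.le_floordiv_iff_mul_le (by omega)]
        omega
      omega
    · simp only [decide_eq_true_eq]
      rw [PySem.List.sorted_id_eq_sorted_id_iff_perm]
      rw [hkn']
      exact hp

theorem pv_scan_pairwise (orig : Int) (h1 : 1 ≤ orig) (K : Int) (target : List Char) :
    List.Pairwise (· < ·)
      (((PySem.List.pyRange 2 K).filter
          (fun k => PySem.List.sorted (PySem.Int.toChars (k * orig)) (fun c => c) = target)).map
          (fun k => k * orig)) := by
  rw [List.pairwise_map]
  refine List.Pairwise.filter _ (List.Pairwise.imp ?_ (pv_pyRange_pairwise 2 K))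
  intro a b hab
  exact mul_lt_mul_of_pos_right hab (by omega)

-- Block 9: the clued DFS
theorem pv_dfs_mem (orig : Int) (d : Nat) (hd : 1 ≤ d) :
    ∀ r, r ≤ d → ∀ (cnt : Nat → Nat) (pref n : Int),
      (n ∈ pvDfs orig d cnt pref r ↔
        ∃ ds : List Nat, ds.length = r ∧ (∀ x ∈ ds, x < 10) ∧ (∀ i, ds.count i ≤ cnt i) ∧
          (r = d → ds.getD 0 0 ≠ 0) ∧
          n = ds.foldl (fun (a : Int) (x : Nat) => a * 10 + (x : Int)) pref ∧ n ≠ orig) := by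
  intro r
  induction r with
  | zero =>
    intro _ cnt pref n
    unfold pvDfs
    constructor
    · intro h
      split_ifs at h with hpo
      · simp at h
        exact ⟨[], rfl, by simp, by simp, fun h0 => absurd h0.symm (by omega), by simp [h], by omega⟩
      · simp at h
    · rintro ⟨ds, hlen, -, -, -, hval, hne⟩
      rw [List.length_eq_zero_iff] at hlen
      subst hlen
      simp at hval
      rw [if_pos (by omega)]
      simp [hval]
  | succ r ih =>
    intro hrd cnt pref n
    have hbody : (fun (out : List Int) (dig : Nat) =>
          if 0 < cnt dig ∧ ¬(r + 1 = d ∧ dig = 0) then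
            out ++ pvDfs orig d (fun j => if j = dig then cnt dig - 1 else cnt j) (pref * 10 + (dig : Int)) r
          else out)
        = (fun out dig => out ++
            (if 0 < cnt dig ∧ ¬(r + 1 = d ∧ dig = 0) then
              pvDfs orig d (fun j => if j = dig then cnt dig - 1 else cnt j) (pref * 10 + (dig : Int)) r
            else [])) := by
      funext out dig
      split_ifs <;> simp
    show n ∈ (List.range 10).foldl _ [] ↔ _
    rw [hbody, PySem.List.foldl_append_eq_flatMap]
    simp only [List.nil_append, List.mem_flatMap, List.mem_range]
    constructor
    · rintro ⟨dig, hdig, hmem⟩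
      by_cases hcond : 0 < cnt dig ∧ ¬(r + 1 = d ∧ dig = 0)
      · rw [if_pos hcond] at hmem
        obtain ⟨ds', hlen, hlt, hct, -, hval, hne⟩ := (ih (by omega) _ _ n).mp hmem
        refine ⟨dig :: ds', by simp [hlen], ?_, ?_, ?_, by simpa using hval, hne⟩
        · intro x hx
          rcases List.mem_cons.mp hx with rfl | hx
          · exact hdig
          · exact hlt x hx
        · intro i
          have hthis := hct i
          have hc1 := hcond.1
          by_cases hne2 : i = dig
          · subst hne2
            simp at hthis
            simp [List.count_cons]
            omega
          · simp only [if_neg hne2] at hthis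
            simp [List.count_cons, hne2, Ne.symm hne2]
            omega
        · intro hrd1
          simp only [List.getD_cons_zero]
          exact fun h0 => hcond.2 ⟨hrd1, h0⟩
      · rw [if_neg hcond] at hmem
        simp at hmem
    · rintro ⟨ds, hlen, hlt, hct, hhead, hval, hne⟩
      cases ds with
      | nil => simp at hlen
      | cons dig ds' =>
        have hdig : dig < 10 := hlt dig (by simp)
        have hcnt : 0 < cnt dig := by
          have := hct dig
          simp [List.count_cons] at this
          omega
        refine ⟨dig, hdig, ?_⟩
        rw [if_pos ⟨hcnt, fun ⟨hrd1, h0⟩ => hhead hrd1 (by simp [h0])⟩]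
        refine (ih (by omega) _ _ n).mpr ⟨ds', by simpa using hlen, fun x hx => hlt x (by simp [hx]), ?_, by omega, by simpa using hval, hne⟩
        intro i
        have hthis := hct i
        by_cases hne2 : i = dig
        · subst hne2
          simp [List.count_cons] at hthis
          simp
          omega
        · simp [List.count_cons, hne2, Ne.symm hne2] at hthis
          rw [if_neg hne2]
          omega

theorem pv_dfs_sorted (orig : Int) (d : Nat) :
    ∀ r (cnt : Nat → Nat) (pref : Int),
      (∀ n ∈ pvDfs orig d cnt pref r, pref * 10 ^ r ≤ n ∧ n < (pref + 1) * 10 ^ r) ∧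
        List.Pairwise (· < ·) (pvDfs orig d cnt pref r) := by
  intro r
  induction r with
  | zero =>
    intro cnt pref
    unfold pvDfs
    constructor
    · intro n hn
      split_ifs at hn with h
      · simp at hn
        subst hn
        simp only [pow_zero, mul_one]
        omega
      · simp at hn
    · split_ifs <;> simp
  | succ r ih =>
    intro cnt pref
    have hbody : (fun (out : List Int) (dig : Nat) =>
          if 0 < cnt dig ∧ ¬(r + 1 = d ∧ dig = 0) then
            out ++ pvDfs orig d (fun j => if j = dig then cnt dig - 1 else cnt j) (pref * 10 + (dig : Int)) r
          else out)
        = (fun out dig => out ++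
            (if 0 < cnt dig ∧ ¬(r + 1 = d ∧ dig = 0) then
              pvDfs orig d (fun j => if j = dig then cnt dig - 1 else cnt j) (pref * 10 + (dig : Int)) r
            else [])) := by
      funext out dig
      split_ifs <;> simp
    have hpow : (0:Int) < 10 ^ r := pow_pos (by norm_num) r
    have hblock : ∀ dig : Nat, dig < 10 → ∀ n ∈ (if 0 < cnt dig ∧ ¬(r + 1 = d ∧ dig = 0) then
              pvDfs orig d (fun j => if j = dig then cnt dig - 1 else cnt j) (pref * 10 + (dig : Int)) r
            else []),
        (pref * 10 + (dig : Int)) * 10 ^ r ≤ n ∧ n < (pref * 10 + (dig : Int) + 1) * 10 ^ r := by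
      intro dig hdig n hn
      split_ifs at hn with hc
      · exact (ih _ _).1 n hn
      · simp at hn
    have hunf : pvDfs orig d cnt pref (r + 1)
        = (List.range 10).flatMap (fun dig =>
            if 0 < cnt dig ∧ ¬(r + 1 = d ∧ dig = 0) then
              pvDfs orig d (fun j => if j = dig then cnt dig - 1 else cnt j) (pref * 10 + (dig : Int)) r
            else []) := by
      show (List.range 10).foldl _ [] = _
      rw [hbody, PySem.List.foldl_append_eq_flatMap, List.nil_append]
    rw [hunf]
    constructor
    · intro n hn
      obtain ⟨dig, hdig, hmem⟩ := List.mem_flatMap.mp hn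
      have hdig10 := List.mem_range.mp hdig
      obtain ⟨hlo, hhi⟩ := hblock dig hdig10 n hmem
      have hdig0 : (0:Int) ≤ (dig:Int) := by positivity
      have hdig9 : (dig:Int) ≤ 9 := by exact_mod_cast Nat.le_of_lt_succ hdig10
      constructor
      · calc pref * 10 ^ (r + 1) = (pref * 10) * 10 ^ r := by ring
          _ ≤ (pref * 10 + (dig:Int)) * 10 ^ r := by nlinarith
          _ ≤ n := hlo
      · calc n < (pref * 10 + (dig:Int) + 1) * 10 ^ r := hhi
          _ ≤ ((pref + 1) * 10) * 10 ^ r := by nlinarith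
          _ = (pref + 1) * 10 ^ (r + 1) := by ring
    · rw [List.pairwise_flatMap]
      constructor
      · intro dig hdig
        split_ifs with hc
        · exact (ih _ _).2
        · exact List.Pairwise.nil
      · refine List.Pairwise.imp_of_mem ?_ List.pairwise_lt_range
        intro d1 d2 h1 h2 hlt x hx y hy
        have h110 := List.mem_range.mp h1
        have h210 := List.mem_range.mp h2
        obtain ⟨-, hxu⟩ := hblock d1 h110 x hx
        obtain ⟨hyl, -⟩ := hblock d2 h210 y hy
        have : ((d1:Int) + 1) ≤ (d2:Int) := by exact_mod_cast hlt
        calc x < (pref * 10 + (d1:Int) + 1) * 10 ^ r := hxu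
          _ ≤ (pref * 10 + (d2:Int)) * 10 ^ r := by nlinarith
          _ ≤ y := hyl

theorem pv_clued_mem (orig : Int) (h1 : 1 ≤ orig) (n : Int) :
    (n ∈ pvDfs orig (PySem.Int.toChars orig).length
        (fun dig => (PySem.Int.toChars orig).count (Char.ofNat (48 + dig))) 0
        (PySem.Int.toChars orig).length)
      ↔ ((PySem.Int.toChars n).Perm (PySem.Int.toChars orig) ∧ n ≠ orig) := by
  have hd : 1 ≤ (PySem.Int.toChars orig).length := by
    rw [pv_toChars_nonneg orig (by omega)]
    exact Nat.length_toDigits_pos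
  have sdig := pv_s_digits orig h1
  rw [pv_dfs_mem orig _ hd _ le_rfl]
  constructor
  · rintro ⟨ds, hlen, hlt, hct, hhead, hval, hne⟩
    have hsumf : ∑ i ∈ Finset.range 10, ds.count i = (PySem.Int.toChars orig).length := by
      rw [pv_sum_count_nat ds hlt, hlen]
    have hsumg : ∑ i ∈ Finset.range 10, (PySem.Int.toChars orig).count (Nat.digitChar i)
        = (PySem.Int.toChars orig).length := pv_sum_count_chars _ sdig
    have hle : ∀ i, i < 10 → ds.count i ≤ (PySem.Int.toChars orig).count (Nat.digitChar i) := by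
      intro i hi
      have := hct i
      rwa [pv_char48 i hi] at this
    have heq := pv_counts_eq_of_le_of_sum _ _ hle (by rw [hsumf, hsumg])
    set p := ds.map Nat.digitChar with hp
    have pdig : ∀ c ∈ p, c.isDigit = true := by
      rintro c hc
      obtain ⟨x, hx, rfl⟩ := List.mem_map.mp hc
      exact pv_isDigit_digitChar x (hlt x hx)
    have hperm : p.Perm (PySem.Int.toChars orig) := by
      rw [List.perm_iff_count]
      intro a
      by_cases ha : a.isDigit = true
      · have hj : a.toNat - 48 < 10 := by
          have := (pv_isDigit_iff a).mp ha
          omega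
        rw [← pv_digitChar_eq a ha, pv_count_map_digitChar ds hlt _ hj, heq _ hj]
      · rw [List.count_eq_zero.mpr, List.count_eq_zero.mpr]
        · exact fun hmem => ha (sdig a hmem)
        · exact fun hmem => ha (pdig a hmem)
    have pne : p ≠ [] := by
      intro hnil
      rw [hp] at hnil
      simp at hnil
      rw [hnil] at hlen
      simp at hlen
      omega
    have phead : p.getD 0 ' ' ≠ '0' := by
      cases ds with
      | nil => simp at hlen; omega
      | cons x t =>
        have hx := hlt x (by simp)
        have hx0 : x ≠ 0 := by
          have := hhead rfl
          simpa using this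
        simp only [hp, List.map_cons, List.getD_cons_zero]
        intro hc
        exact hx0 ((pv_digitChar_inj x hx 0 (by norm_num)).mp (by simpa using hc))
    have hvb := pv_val_bounds p pdig
    have hvp : pvIntOfDigits p = n := by
      rw [hp, pv_val_map_digitChar ds hlt, hval]
    have htc : PySem.Int.toChars n = p := by
      rw [← hvp, pv_toChars_nonneg _ hvb.1]
      exact pv_toDigits_canonical p pdig pne phead
    rw [htc]
    exact ⟨hperm, hne⟩
  · rintro ⟨hperm, hne⟩
    obtain ⟨hn1, hnec, hh, hval⟩ := pv_good_elem_A orig n h1 hperm hne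
    have ndig := pv_s_digits n hn1
    refine ⟨(PySem.Int.toChars n).map (fun c => c.toNat - 48), ?_, ?_, ?_, ?_, ?_, hne⟩
    · rw [List.length_map]
      exact hperm.length_eq
    · intro x hx
      obtain ⟨c, hc, rfl⟩ := List.mem_map.mp hx
      have := (pv_isDigit_iff c).mp (ndig c hc)
      omega
    · have hmap : ((PySem.Int.toChars n).map (fun c => c.toNat - 48)).map Nat.digitChar
          = PySem.Int.toChars n := by
        rw [List.map_map]
        calc ((PySem.Int.toChars n).map (Nat.digitChar ∘ fun c => c.toNat - 48))
            = (PySem.Int.toChars n).map id := by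
              refine List.map_congr_left ?_
              intro c hc
              exact pv_digitChar_eq c (ndig c hc)
          _ = PySem.Int.toChars n := List.map_id _
      intro i
      by_cases hi : i < 10
      · rw [pv_char48 i hi, ← pv_count_map_digitChar ((PySem.Int.toChars n).map (fun c => c.toNat - 48))
          (by
            intro x hx
            obtain ⟨c, hc, rfl⟩ := List.mem_map.mp hx
            have := (pv_isDigit_iff c).mp (ndig c hc)
            omega) i hi, hmap]
        rw [List.perm_iff_count.mp hperm]
      · rw [List.count_eq_zero.mpr]
        · omega
        · intro hx
          obtain ⟨c, hc, rfl⟩ := List.mem_map.mp hx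
          have := (pv_isDigit_iff c).mp (ndig c hc)
          omega
    · intro _hdd
      obtain ⟨c, t, hsn⟩ : ∃ c t, PySem.Int.toChars n = c :: t := by
        cases h : PySem.Int.toChars n with
        | nil => exact absurd h (pv_s_ne_nil n hn1)
        | cons c t => exact ⟨c, t, rfl⟩
      rw [hsn]
      simp only [List.map_cons, List.getD_cons_zero]
      have hcd : c.isDigit = true := ndig c (by rw [hsn]; simp)
      have hb := (pv_isDigit_iff c).mp hcd
      intro h48
      have hc0 : c = Nat.digitChar 0 := by rw [← pv_digitChar_eq c hcd, h48]
      rw [hsn] at hh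
      simp only [List.getD_cons_zero] at hh
      exact hh (by rw [hc0]; rfl)
    · have hmap : ((PySem.Int.toChars n).map (fun c => c.toNat - 48)).map Nat.digitChar
          = PySem.Int.toChars n := by
        rw [List.map_map]
        calc ((PySem.Int.toChars n).map (Nat.digitChar ∘ fun c => c.toNat - 48))
            = (PySem.Int.toChars n).map id := by
              refine List.map_congr_left ?_
              intro c hc
              exact pv_digitChar_eq c (ndig c hc)
          _ = PySem.Int.toChars n := List.map_id _
      have := pv_val_map_digitChar ((PySem.Int.toChars n).map (fun c => c.toNat - 48))
        (by
          intro x hx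
          obtain ⟨c, hc, rfl⟩ := List.mem_map.mp hx
          have := (pv_isDigit_iff c).mp (ndig c hc)
          omega)
      rw [hmap] at this
      rw [← this, hval]

-- ===== VERDICT (by name: the statement is the Claim_ definition above) =====
theorem generate_anagram_solutions_for_clue_spec : Claim_equal_generate_anagram_solutions_for_clue := by
  unfold Claim_equal_generate_anagram_solutions_for_clue
  intro orig len u _hdom hpre
  unfold Spec_generate_anagram_solutions_for_clue
  obtain ⟨h0, _h2⟩ := hpre
  unfold generate_anagram_solutions_for_clue generate_anagram_solutions_for_clue_alt
  by_cases hz : orig = 0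
  · rw [if_pos hz, if_pos hz]
  · have h1 : 1 ≤ orig := by omega
    rw [if_neg hz, if_neg hz]
    by_cases hl : len = 2
    · rw [if_pos hl, if_pos hl]
    · rw [if_neg hl, if_neg hl]
      cases u with
      | false =>
        show PySem.List.sorted _ (fun x => x) = pvDfs _ _ _ _ _
        apply PySem.List.sorted_eq_of_perm_of_pairwise_lt
        · refine (List.perm_ext_iff_of_nodup ?_ ?_).mpr ?_
          · exact ((pv_dfs_sorted orig _ _ _ _).2).imp (fun h => ne_of_lt h)
          · exact pv_A_nodup orig false
          · intro a
            constructor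
            · intro ha
              obtain ⟨hp, hne⟩ := (pv_clued_mem orig h1 a).mp ha
              exact (pv_A_mem orig h1 false a).mpr ⟨hp, hne, fun h => by cases h⟩
            · intro ha
              obtain ⟨hp, hne, -⟩ := (pv_A_mem orig h1 false a).mp ha
              exact (pv_clued_mem orig h1 a).mpr ⟨hp, hne⟩
        · exact (pv_dfs_sorted orig _ _ _ _).2
      | true =>
        show PySem.List.sorted _ (fun x => x) = List.foldl _ []
          (PySem.List.pyRange 2 (PySem.Int.floordiv (10 ^ (PySem.Int.toChars orig).length - 1) orig + 1))
        rw [pv_scan_eq_map_filter]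
        apply PySem.List.sorted_eq_of_perm_of_pairwise_lt
        · refine (List.perm_ext_iff_of_nodup ?_ ?_).mpr ?_
          · exact (pv_scan_pairwise orig h1 _ _).imp (fun h => ne_of_lt h)
          · exact pv_A_nodup orig true
          · intro a
            exact (pv_scan_mem orig h1 a).trans (pv_A_mem orig h1 true a).symm
        · exact pv_scan_pairwise orig h1 _ _
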